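-- pv_equiv track=rewrite | github.com/wajdiJomaa/SHELL | app/main.py | index_of_next_slash
-- ===== SOURCE A (Python) =====
-- def index_of_next_slash(path):
--     is_slash = False
--     index_slash = -1
--     for i in range(len(path)):
--         if path[i] == "/":
--             is_slash = True
--             index_slash = i
--         elif is_slash is True:
--             return index_slash
--     return index_slash
-- ===== SOURCE B (Python) =====
-- def index_of_next_slash(path):
--     n = len(path)
--     s = 0
--     while s < n and path[s] != "/":
--         s += 1
--     if s == n:
--         return -1
--     j = s + 1
--     while j < n and path[j] == "/":
--         j += 1
--     return j - 1
-- ===== Notes on version B (the rewrite author's own statement) =====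
-- stated objective: simpler
-- what changed: Replaces the single stateful is_slash/index_slash flag-machine pass with a two-phase structure: locate the first slash character, then advance to the end of that slash run and return its last index (or -1 when no slash occurs).
import Mathlib
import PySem

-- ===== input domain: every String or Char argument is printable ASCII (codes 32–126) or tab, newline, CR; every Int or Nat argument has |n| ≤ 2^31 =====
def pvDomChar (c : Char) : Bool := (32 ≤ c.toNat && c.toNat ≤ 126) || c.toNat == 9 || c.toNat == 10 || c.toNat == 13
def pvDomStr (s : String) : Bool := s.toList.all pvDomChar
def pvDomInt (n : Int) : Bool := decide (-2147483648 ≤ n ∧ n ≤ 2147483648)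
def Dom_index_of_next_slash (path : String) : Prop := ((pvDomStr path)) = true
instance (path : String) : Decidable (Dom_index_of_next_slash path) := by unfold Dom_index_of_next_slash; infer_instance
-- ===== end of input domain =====

-- B replaces A's single stateful is_slash/index_slash pass with a two-phase
-- locate-first-slash then measure-the-run structure (objective: simpler).


-- ===== PORT A =====
-- A's for-loop over range(len(path)) with state (is_slash, index_slash) and early return,
-- as structural recursion over the character list with the running index i.
def pvAgo (cs : List Char) (i : Int) (isSlash : Bool) (indexSlash : Int) : Int :=
  match cs with
  | [] => indexSlash
  | c :: rest =>
    if c = '/' then pvAgo rest (i + 1) true i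
    else if isSlash = true then indexSlash
    else pvAgo rest (i + 1) isSlash indexSlash

def index_of_next_slash (path : String) : Int :=
  pvAgo path.toList 0 false (-1)

-- ===== PORT B =====
-- phase 2: advance j while path[j] == '/', return j - 1
def pvBrun (cs : List Char) (j : Int) : Int :=
  match cs with
  | [] => j - 1
  | c :: rest => if c = '/' then pvBrun rest (j + 1) else j - 1

-- phase 1: find the first '/' (return -1 if none), then run phase 2 from s + 1
def pvBfind (cs : List Char) (s : Int) : Int :=
  match cs with
  | [] => -1
  | c :: rest => if c = '/' then pvBrun rest (s + 1) else pvBfind rest (s + 1)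

def index_of_next_slash_alt (path : String) : Int :=
  pvBfind path.toList 0

-- ===== PRECONDITION & SPEC =====
def Spec_index_of_next_slash (path : String) (out : Int) : Prop := out = index_of_next_slash_alt path
instance (path : String) (out : Int) : Decidable (Spec_index_of_next_slash path out) := by unfold Spec_index_of_next_slash; infer_instance

-- ===== CLAIM (what is proved, stated in full; the proofs are below) =====
def Claim_equal_index_of_next_slash : Prop := ∀ (path : String), Dom_index_of_next_slash path → Spec_index_of_next_slash path (index_of_next_slash path)

-- ===== LEMMAS AND PROOFS =====
theorem pvAgo_true (cs : List Char) : ∀ (i : Int), pvAgo cs i true (i - 1) = pvBrun cs i := by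
  induction cs with
  | nil => intro i; simp [pvAgo, pvBrun]
  | cons c rest ih =>
    intro i
    by_cases h : c = '/'
    · simpa [pvAgo, pvBrun, h, Int.add_sub_cancel] using ih (i + 1)
    · simp [pvAgo, pvBrun, h]

theorem pvAgo_false (cs : List Char) : ∀ (i : Int), pvAgo cs i false (-1) = pvBfind cs i := by
  induction cs with
  | nil => intro i; simp [pvAgo, pvBfind]
  | cons c rest ih =>
    intro i
    by_cases h : c = '/'
    · simpa [pvAgo, pvBfind, h, Int.add_sub_cancel] using pvAgo_true rest (i + 1)
    · simpa [pvAgo, pvBfind, h] using ih (i + 1)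

-- ===== VERDICT (by name: the statement is the Claim_ definition above) =====
theorem index_of_next_slash_spec : Claim_equal_index_of_next_slash := by
  intro path _
  unfold Spec_index_of_next_slash index_of_next_slash index_of_next_slash_alt
  exact pvAgo_false path.toList 0
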